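-- pv_equiv track=rewrite | github.com/mckjzhangxk/deepAI | ippackage/data/preparedata.py | _get_valid_input
-- ===== SOURCE A (Python) =====
-- def _get_valid_input(series):
--     '''
--     series是一个list,表示时间序列,但是这个序列头尾
--     可能会被大量的None填充,这些视为无效输入,因为可能
--     这段实际根本就不存在链接通信.
--
--     返回:l=serise[a,b],l[0]和l[-1]不为None,
--     l的长度是有效序列的长度
--     :param series:
--     :return:
--     '''
--     s = 0
--     for k in series:
--         if k is None:
--             s += 1
--         else:
--             break
--     e = len(series)
--     for k in reversed(series):
--         if k is None:
--             e -= 1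
--         else:
--             break
--     assert e > s, 'at least one element is not None'
--     return series[s:e]
-- ===== SOURCE B (Python) =====
-- def _get_valid_input(series):
--     first = None
--     last = None
--     for i, k in enumerate(series):
--         if k is not None:
--             if first is None:
--                 first = i
--             last = i
--     assert first is not None, 'at least one element is not None'
--     return series[first:last + 1]
-- ===== Notes on version B (the rewrite author's own statement) =====
-- stated objective: simpler
-- what changed: Replaces the two end-scans (forward scan plus reversed scan) with a single forward pass that records the first and last non-None index, then slices once.
import Mathlib
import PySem

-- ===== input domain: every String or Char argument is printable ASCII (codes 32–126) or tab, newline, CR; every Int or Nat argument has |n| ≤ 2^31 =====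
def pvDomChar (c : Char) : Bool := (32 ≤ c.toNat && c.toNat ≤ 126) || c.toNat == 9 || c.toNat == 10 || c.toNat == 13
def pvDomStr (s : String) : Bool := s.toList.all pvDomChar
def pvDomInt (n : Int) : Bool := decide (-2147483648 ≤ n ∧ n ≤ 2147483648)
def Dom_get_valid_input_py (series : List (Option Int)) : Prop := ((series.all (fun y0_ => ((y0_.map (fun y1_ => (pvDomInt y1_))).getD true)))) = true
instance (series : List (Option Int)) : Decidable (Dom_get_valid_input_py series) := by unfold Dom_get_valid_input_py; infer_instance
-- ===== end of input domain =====

-- B replaces A's two end-scans (forward + reversed) with one forward pass recording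
-- the first and last non-None index, then slices once; objective: simpler.


-- ===== PORT A =====
-- A's first loop: count leading Nones (breaks at first non-None).
def pvCountLead : List (Option Int) → Nat
  | [] => 0
  | none :: t => pvCountLead t + 1
  | some _ :: _ => 0

def get_valid_input_py (series : List (Option Int)) : List (Option Int) :=
  let s : Nat := pvCountLead series
  -- second loop over reversed(series): e = len - (count of trailing Nones)
  let e : Nat := series.length - pvCountLead series.reverse
  -- assert e > s: on all-None input Python raises AssertionError (excluded by Pre_)
  PySem.List.slice series (some (s : Int)) (some (e : Int))

-- ===== PORT B =====
-- one forward pass over enumerate(series) maintaining (first, last) non-None indices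
def pvStep (fl : Option Int × Option Int) (ik : Int × Option Int) : Option Int × Option Int :=
  if ik.2.isSome then ((if fl.1 = none then some ik.1 else fl.1), some ik.1) else fl

def get_valid_input_py_alt (series : List (Option Int)) : List (Option Int) :=
  let st := (PySem.List.enumerate series 0).foldl pvStep (none, none)
  match st.1, st.2 with
  | some f, some l => PySem.List.slice series (some f) (some (l + 1))
  | _, _ => []  -- Python asserts here (excluded by Pre_)

-- ===== PRECONDITION & SPEC =====
-- Pre_ excludes empty / all-None input, where both A and B raise AssertionError.
def Pre_get_valid_input_py (series : List (Option Int)) : Prop :=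
  series.any (fun k => k.isSome) = true
instance (series : List (Option Int)) : Decidable (Pre_get_valid_input_py series) := by
  unfold Pre_get_valid_input_py; infer_instance

def pvWitness_get_valid_input_py : List (Option Int) := [none, some 3, none, some 5, none]

def Spec_get_valid_input_py (series : List (Option Int)) (out : List (Option Int)) : Prop := out = get_valid_input_py_alt series
instance (series : List (Option Int)) (out : List (Option Int)) : Decidable (Spec_get_valid_input_py series out) := by unfold Spec_get_valid_input_py; infer_instance

-- ===== CLAIM (what is proved, stated in full; the proofs are below) =====
def Claim_equal_get_valid_input_py : Prop := ∀ (series : List (Option Int)), Dom_get_valid_input_py series → Pre_get_valid_input_py series → Spec_get_valid_input_py series (get_valid_input_py series)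

-- ===== LEMMAS AND PROOFS =====

lemma countLead_lt_length (xs : List (Option Int)) (h : xs.any (fun k => k.isSome) = true) :
    pvCountLead xs < xs.length := by
  induction xs with
  | nil => simp at h
  | cons a t ih =>
    cases a with
    | none =>
      have h' : t.any (fun k => k.isSome) = true := by simpa using h
      simpa [pvCountLead] using Nat.succ_lt_succ (ih h')
    | some v => simp [pvCountLead]

lemma countLead_append_of_any (ys zs : List (Option Int))
    (h : ys.any (fun k => k.isSome) = true) :
    pvCountLead (ys ++ zs) = pvCountLead ys := by
  induction ys with
  | nil => simp at h
  | cons a t ih =>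
    cases a with
    | none =>
      have h' : t.any (fun k => k.isSome) = true := by simpa using h
      simp [pvCountLead, ih h']
    | some v => simp [pvCountLead]

lemma countLead_append_some (ys : List (Option Int)) (v : Int)
    (hys : ∀ x ∈ ys, x = none) :
    pvCountLead (ys ++ [some v]) = ys.length := by
  induction ys with
  | nil => simp [pvCountLead]
  | cons b r ihr =>
    have hb : b = none := hys b (by simp)
    subst hb
    simp [pvCountLead, ihr (fun x hx => hys x (by simp [hx]))]

lemma fold_of_all_none (xs : List (Option Int)) (s : Int) (acc : Option Int × Option Int)
    (h : xs.any (fun k => k.isSome) = false) :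
    (PySem.List.enumerate xs s).foldl pvStep acc = acc := by
  induction xs generalizing s with
  | nil => simp [PySem.List.enumerate_nil]
  | cons a t ih =>
    cases a with
    | none =>
      have h' : t.any (fun k => k.isSome) = false := by simpa using h
      simp [PySem.List.enumerate_cons, pvStep]
      exact ih (s + 1) h'
    | some v => simp at h

lemma fold_spec (xs : List (Option Int)) (s : Int) (F L : Option Int)
    (h : xs.any (fun k => k.isSome) = true) :
    (PySem.List.enumerate xs s).foldl pvStep (F, L) =
      ((if F = none then some (s + (pvCountLead xs : Int)) else F),
       some (s + ((xs.length - 1 - pvCountLead xs.reverse : Nat) : Int))) := by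
  induction xs generalizing s F L with
  | nil => simp at h
  | cons a t ih =>
    cases a with
    | none =>
      have h' : t.any (fun k => k.isSome) = true := by simpa using h
      rw [PySem.List.enumerate_cons]
      simp only [List.foldl_cons, pvStep, Option.isSome_none, Bool.false_eq_true, if_false]
      rw [ih (s + 1) F L h']
      have hanyrev : t.reverse.any (fun k => k.isSome) = true := by simpa using h'
      have hcl : pvCountLead ((none :: t : List (Option Int)).reverse) = pvCountLead t.reverse := by
        have hrev : (none :: t : List (Option Int)).reverse = t.reverse ++ [none] := by simp
        rw [hrev, countLead_append_of_any _ _ hanyrev]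
      have hlt : pvCountLead t.reverse < t.length := by
        have := countLead_lt_length t.reverse hanyrev
        simpa using this
      rw [Prod.mk.injEq]
      constructor
      · cases F with
        | none =>
          simp only [reduceIte, pvCountLead, Option.some.injEq]
          push_cast
          ring
        | some f => simp
      · rw [hcl]
        congr 1
        have heq : (t.length + 1) - 1 - pvCountLead t.reverse = (t.length - 1 - pvCountLead t.reverse) + 1 := by
          omega
        simp only [List.length_cons, heq]
        push_cast
        ring
    | some v =>
      rw [PySem.List.enumerate_cons]
      simp only [List.foldl_cons, pvStep, Option.isSome_some, if_true]
      by_cases ht : t.any (fun k => k.isSome) = true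
      · rw [ih (s + 1) _ _ ht]
        have hanyrev : t.reverse.any (fun k => k.isSome) = true := by simpa using ht
        have hcl : pvCountLead ((some v :: t : List (Option Int)).reverse) = pvCountLead t.reverse := by
          have hrev : (some v :: t : List (Option Int)).reverse = t.reverse ++ [some v] := by simp
          rw [hrev, countLead_append_of_any _ _ hanyrev]
        have hlt : pvCountLead t.reverse < t.length := by
          have := countLead_lt_length t.reverse hanyrev
          simpa using this
        rw [Prod.mk.injEq]
        constructor
        · cases F with
          | none => simp [pvCountLead]
          | some f => simp
        · rw [hcl]
          congr 1
          have heq : (t.length + 1) - 1 - pvCountLead t.reverse = (t.length - 1 - pvCountLead t.reverse) + 1 := by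
            omega
          simp only [List.length_cons, heq]
          push_cast
          ring
      · have ht' : t.any (fun k => k.isSome) = false := by simpa using ht
        rw [fold_of_all_none t (s + 1) _ ht']
        have hall : ∀ x ∈ t.reverse, x = none := by
          intro x hx
          have hx' : x ∈ t := by simpa using hx
          cases x with
          | none => rfl
          | some w =>
            exfalso
            have : t.any (fun k => k.isSome) = true := by
              rw [List.any_eq_true]; exact ⟨some w, hx', rfl⟩
            simp [this] at ht'
        have hcl : pvCountLead ((some v :: t : List (Option Int)).reverse) = t.length := by
          have hrev : (some v :: t : List (Option Int)).reverse = t.reverse ++ [some v] := by simp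
          rw [hrev, countLead_append_some _ _ hall]
          simp
        rw [Prod.mk.injEq]
        constructor
        · cases F with
          | none => simp [pvCountLead]
          | some f => simp
        · rw [hcl]
          simp

lemma ports_agree (series : List (Option Int)) (h : Pre_get_valid_input_py series) :
    get_valid_input_py series = get_valid_input_py_alt series := by
  unfold Pre_get_valid_input_py at h
  unfold get_valid_input_py get_valid_input_py_alt
  rw [fold_spec series 0 none none h]
  simp only [reduceIte, zero_add]
  have hanyrev : series.reverse.any (fun k => k.isSome) = true := by simpa using h
  have hlt : pvCountLead series.reverse < series.length := by
    have := countLead_lt_length series.reverse hanyrev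
    simpa using this
  have hcast : ((series.length - 1 - pvCountLead series.reverse : Nat) : Int) + 1 =
      ((series.length - pvCountLead series.reverse : Nat) : Int) := by
    omega
  rw [hcast]

-- ===== VERDICT (by name: the statement is the Claim_ definition above) =====
theorem get_valid_input_py_spec : Claim_equal_get_valid_input_py := by
  intro series _ hpre
  unfold Spec_get_valid_input_py
  exact ports_agree series hpre
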